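-- pv_equiv track=rewrite | github.com/espressif/arduino-esp32 | .github/scripts/generate_missing_junits.py | _sdkconfig_meets
-- ===== SOURCE A (Python) =====
-- def _sdkconfig_meets(ci_cfg: dict, sdk_text: str) -> bool:
--     if not sdk_text:
--         return True
--     for req in ci_cfg.get("requires", []):
--         if not req or not isinstance(req, str):
--             continue
--         if not any(line.startswith(req) for line in sdk_text.splitlines()):
--             return False
--     req_any = ci_cfg.get("requires_any", [])
--     if req_any:
--         if not any(any(line.startswith(r.strip()) for line in sdk_text.splitlines()) for r in req_any if isinstance(r, str)):
--             return False
--     return True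
-- ===== SOURCE B (Python) =====
-- def _sdkconfig_meets(ci_cfg: dict, sdk_text: str) -> bool:
--     if not sdk_text:
--         return True
--     pending = [r for r in ci_cfg.get("requires", []) if r and isinstance(r, str)]
--     req_any = ci_cfg.get("requires_any", [])
--     any_opts = [r.strip() for r in req_any if isinstance(r, str)]
--     any_hit = not req_any
--     for line in sdk_text.splitlines():
--         pending = [p for p in pending if not line.startswith(p)]
--         if not any_hit and any(line.startswith(o) for o in any_opts):
--             any_hit = True
--         if not pending and any_hit:
--             return True
--     return not pending and any_hit
-- ===== Notes on version B (the rewrite author's own statement) =====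
-- stated objective: alternative
-- what changed: B splits the sdkconfig text once and makes a single pass over the lines, maintaining the set of still-unmet 'requires' prefixes and an 'any' flag with early exit, instead of A's per-requirement rescans that re-split the whole text for every requirement.
import Mathlib
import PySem

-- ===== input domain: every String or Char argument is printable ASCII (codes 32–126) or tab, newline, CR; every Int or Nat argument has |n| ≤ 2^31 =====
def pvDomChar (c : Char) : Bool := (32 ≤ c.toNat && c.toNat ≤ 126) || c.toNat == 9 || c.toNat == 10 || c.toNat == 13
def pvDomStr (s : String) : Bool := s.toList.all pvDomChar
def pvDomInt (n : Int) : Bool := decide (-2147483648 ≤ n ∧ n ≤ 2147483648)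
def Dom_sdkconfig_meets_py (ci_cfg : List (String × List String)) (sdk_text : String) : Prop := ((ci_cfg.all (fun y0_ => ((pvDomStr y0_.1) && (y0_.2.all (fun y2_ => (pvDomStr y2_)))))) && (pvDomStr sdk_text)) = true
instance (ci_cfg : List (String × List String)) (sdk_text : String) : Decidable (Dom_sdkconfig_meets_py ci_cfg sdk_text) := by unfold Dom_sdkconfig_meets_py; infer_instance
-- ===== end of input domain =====

-- B splits the text once and makes a single pass over its lines with an early exit,
-- instead of A's per-requirement rescans that re-split the text each time (objective: alternative).

-- ===== PORT A =====
-- dict.get(k, []) on the association list: first match, defaulting to []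
def pvGet (d : List (String × List String)) (k : String) : List String :=
  match d.find? (fun p => p.1 == k) with
  | some p => p.2
  | none => []

def sdkconfig_meets_py (ci_cfg : List (String × List String)) (sdk_text : String) : Bool :=
  if sdk_text = "" then true
  else if (pvGet ci_cfg "requires").all
      (fun req => req == "" ||
        (PySem.Str.splitlines sdk_text).any (fun line => PySem.Str.startswith line req)) then
    let req_any := pvGet ci_cfg "requires_any"
    if req_any.isEmpty then true
    else req_any.any (fun r =>
      (PySem.Str.splitlines sdk_text).any (fun line => PySem.Str.startswith line (PySem.Str.strip r)))
  else false

-- ===== PORT B =====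
-- the single pass: 'pending' = requires-prefixes not yet seen, 'anyHit' = requires_any satisfied
def pvAltLoop (lines : List String) (pending : List String) (anyOpts : List String) (anyHit : Bool) : Bool :=
  match lines with
  | [] => pending.isEmpty && anyHit
  | line :: rest =>
    let pending' := pending.filter (fun p => !(PySem.Str.startswith line p))
    let anyHit' := anyHit || anyOpts.any (fun o => PySem.Str.startswith line o)
    if pending'.isEmpty && anyHit' then true
    else pvAltLoop rest pending' anyOpts anyHit'

def sdkconfig_meets_py_alt (ci_cfg : List (String × List String)) (sdk_text : String) : Bool :=
  if sdk_text = "" then true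
  else
    let reqAny := pvGet ci_cfg "requires_any"
    pvAltLoop (PySem.Str.splitlines sdk_text)
      ((pvGet ci_cfg "requires").filter (fun r => !(r == "")))
      (reqAny.map PySem.Str.strip)
      reqAny.isEmpty

-- ===== PRECONDITION & SPEC =====
def Spec_sdkconfig_meets_py (ci_cfg : List (String × List String)) (sdk_text : String) (out : Bool) : Prop := out = sdkconfig_meets_py_alt ci_cfg sdk_text
instance (ci_cfg : List (String × List String)) (sdk_text : String) (out : Bool) : Decidable (Spec_sdkconfig_meets_py ci_cfg sdk_text out) := by unfold Spec_sdkconfig_meets_py; infer_instance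

-- ===== CLAIM (what is proved, stated in full; the proofs are below) =====
def Claim_equal_sdkconfig_meets_py : Prop := ∀ (ci_cfg : List (String × List String)) (sdk_text : String), Dom_sdkconfig_meets_py ci_cfg sdk_text → Spec_sdkconfig_meets_py ci_cfg sdk_text (sdkconfig_meets_py ci_cfg sdk_text)

-- ===== LEMMAS AND PROOFS =====

-- all over a filter by the negated test = all of the disjunction
theorem pv_all_filter_not {α : Type} (xs : List α) (c q : α → Bool) :
    (xs.filter (fun x => !c x)).all q = xs.all (fun x => c x || q x) := by
  induction xs with
  | nil => rfl
  | cons x xs ih => cases h : c x <;> simp [h, ih]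

theorem pv_any_or {α : Type} (xs : List α) (a b : α → Bool) :
    xs.any (fun x => a x || b x) = (xs.any a || xs.any b) := by
  induction xs with
  | nil => rfl
  | cons x xs ih => simp [ih]; ac_rfl

-- characterisation of B's single pass
theorem pvAltLoop_eq (lines pending anyOpts : List String) (anyHit : Bool) :
    pvAltLoop lines pending anyOpts anyHit =
      (pending.all (fun p => lines.any (fun l => PySem.Str.startswith l p)) &&
       (anyHit || anyOpts.any (fun o => lines.any (fun l => PySem.Str.startswith l o)))) := by
  induction lines generalizing pending anyHit with
  | nil => cases pending <;> simp [pvAltLoop]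
  | cons line rest ih =>
    have hE :
        (pending.all (fun p => (line :: rest).any (fun l => PySem.Str.startswith l p)) &&
          (anyHit || anyOpts.any (fun o => (line :: rest).any (fun l => PySem.Str.startswith l o)))) =
        ((pending.filter (fun p => !(PySem.Str.startswith line p))).all
            (fun p => rest.any (fun l => PySem.Str.startswith l p)) &&
          ((anyHit || anyOpts.any (fun o => PySem.Str.startswith line o)) ||
            anyOpts.any (fun o => rest.any (fun l => PySem.Str.startswith l o)))) := by
      rw [pv_all_filter_not]
      simp [pv_any_or]
      ac_rfl
    rw [hE, pvAltLoop]
    split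
    · next h =>
      rw [Bool.and_eq_true] at h
      rw [List.isEmpty_iff.mp h.1, h.2]
      simp
    · next h =>
      exact ih _ _

theorem sdkconfig_meets_py_eq (ci_cfg : List (String × List String)) (sdk_text : String) :
    sdkconfig_meets_py ci_cfg sdk_text = sdkconfig_meets_py_alt ci_cfg sdk_text := by
  unfold sdkconfig_meets_py sdkconfig_meets_py_alt
  by_cases h0 : sdk_text = ""
  · simp [h0]
  · simp only [if_neg h0]
    rw [pvAltLoop_eq, pv_all_filter_not, List.any_map]
    cases hall : (pvGet ci_cfg "requires").all
        (fun req => req == "" ||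
          (PySem.Str.splitlines sdk_text).any (fun line => PySem.Str.startswith line req)) <;>
      cases hemp : (pvGet ci_cfg "requires_any").isEmpty <;>
        simp_all [Function.comp_def]

-- ===== VERDICT (by name: the statement is the Claim_ definition above) =====
theorem sdkconfig_meets_py_spec : Claim_equal_sdkconfig_meets_py := by
  intro ci_cfg sdk_text _
  unfold Spec_sdkconfig_meets_py
  exact sdkconfig_meets_py_eq ci_cfg sdk_text
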